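-- pv_equiv track=rewrite | github.com/MrBrantCode/unitest_baseline | mut_generate/mist_train_taco/taco_16020/solution.py | max_potatoes_after_year
-- ===== SOURCE A (Python) =====
-- def max_potatoes_after_year(N, M, K, aList, bList):
--     # Sort the fields by the number of potatoes harvested per potato planted in descending order
--     abList = sorted(zip(aList, bList), key=lambda x: -x[0])
--
--     # Initialize the dynamic programming table
--     dp = [[0] * (M + 1) for _ in range(K + 1)]
--
--     # Fill the dynamic programming table
--     for a, b in abList:
--         for y in range(K - 1, -1, -1):
--             for x in range(M - 1, -1, -1):
--                 use = min(b, M - x)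
--                 dp[y + 1][x + use] = max(dp[y + 1][x + use], dp[y][x] + use * a)
--
--     # Find the maximum number of potatoes after one year
--     ans = 0
--     for y in range(K + 1):
--         for x in range(M + 1):
--             ans = max(ans, dp[y][x] + M - x)
--
--     return ans
-- ===== SOURCE B (Python) =====
-- def max_potatoes_after_year(N, M, K, aList, bList):
--     if M < 0 or K < 0:
--         return 0  # degenerate sizes: no table to fill, nothing to harvest
--     fields = sorted(zip(aList, bList), key=lambda t: -t[0])
--     memo = {}
--
--     def solve(rest, k, planted):
--         if not rest or k == 0:
--             return M - planted
--         key = (len(rest), k, planted)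
--         if key in memo:
--             return memo[key]
--         (a, b), tail = rest[0], rest[1:]
--         best = solve(tail, k, planted)
--         use = min(b, M - planted)
--         cand = use * a + solve(tail, k - 1, planted + use)
--         if cand > best:
--             best = cand
--         memo[key] = best
--         return best
--
--     return solve(fields, K, 0)
-- ===== Notes on version B (the rewrite author's own statement) =====
-- stated objective: alternative
-- what changed: Replaces A's in-place 2D bottom-up DP table over (fields used, potatoes planted) plus a separate final max scan by a top-down memoized recursion over the sorted field list (skip the field, or plant min(b, M-planted)), folding the unplanted yield M-planted into the base case.
-- outside the precondition, e.g. on max_potatoes_after_year(2, 4, 1, [1, -3], [3, -1]): A returns 7, B returns 8; on max_potatoes_after_year(1, 0, 1, [-5], [-2]): A returns 0, B returns 12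
import Mathlib
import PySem

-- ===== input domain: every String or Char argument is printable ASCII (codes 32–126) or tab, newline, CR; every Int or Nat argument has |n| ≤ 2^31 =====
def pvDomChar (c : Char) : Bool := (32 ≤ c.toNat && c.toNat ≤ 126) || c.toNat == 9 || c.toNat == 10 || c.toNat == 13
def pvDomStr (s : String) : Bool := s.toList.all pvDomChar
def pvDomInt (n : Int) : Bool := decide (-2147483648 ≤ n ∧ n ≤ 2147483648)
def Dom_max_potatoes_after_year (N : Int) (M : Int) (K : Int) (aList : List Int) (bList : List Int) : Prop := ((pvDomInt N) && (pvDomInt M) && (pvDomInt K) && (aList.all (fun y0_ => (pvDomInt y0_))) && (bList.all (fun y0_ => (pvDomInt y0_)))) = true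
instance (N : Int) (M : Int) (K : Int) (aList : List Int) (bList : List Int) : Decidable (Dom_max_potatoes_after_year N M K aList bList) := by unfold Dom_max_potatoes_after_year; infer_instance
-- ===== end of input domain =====

-- B replaces A's in-place 2D table fill (plus a final max scan) by a top-down memoized
-- recursion over the sorted field list whose base case folds in the unplanted yield
-- (objective: alternative decomposition, similar cost; equivalence proved on Pre_ below).

-- ===== PORT A =====
-- dp[y][x] read (Python raises only outside Pre_; there the total form returns 0)
def pvReadA (dp : List (List Int)) (y x : Int) : Int :=
  (PySem.List.pyGet? ((PySem.List.pyGet? dp y).getD []) x).getD 0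

-- dp[y][x] = v (in-place row update; Python raises only outside Pre_)
def pvWriteA (dp : List (List Int)) (y x : Int) (v : Int) : List (List Int) :=
  PySem.List.pySetD dp y (PySem.List.pySetD ((PySem.List.pyGet? dp y).getD []) x v)

def max_potatoes_after_year (N : Int) (M : Int) (K : Int) (aList : List Int) (bList : List Int) : Int :=
  -- abList = sorted(zip(aList, bList), key=lambda x: -x[0])
  let abList := PySem.List.sorted (aList.zip bList) (fun t => -t.1) false
  -- dp = [[0]*(M+1) for _ in range(K+1)]
  let dp0 : List (List Int) := List.replicate (K + 1).toNat (List.replicate (M + 1).toNat 0)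
  -- for a, b in abList: for y in range(K-1,-1,-1): for x in range(M-1,-1,-1): ...
  let dp := abList.foldl (fun dp ab =>
    (PySem.List.pyRange (K - 1) (-1) (-1)).foldl (fun dp y =>
      (PySem.List.pyRange (M - 1) (-1) (-1)).foldl (fun dp x =>
        let use := min ab.2 (M - x)
        pvWriteA dp (y + 1) (x + use)
          (max (pvReadA dp (y + 1) (x + use)) (pvReadA dp y x + use * ab.1))) dp) dp) dp0
  -- ans = 0; for y in range(K+1): for x in range(M+1): ans = max(ans, dp[y][x] + M - x)
  (PySem.List.pyRange 0 (K + 1) 1).foldl (fun ans y =>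
    (PySem.List.pyRange 0 (M + 1) 1).foldl (fun ans x =>
      max ans (pvReadA dp y x + M - x)) ans) 0

-- ===== PORT B =====
-- solve(rest, k, planted) with memo keyed by (len(rest), k, planted), threading the dict
def pvSolveB (M : Int) : List (Int × Int) → Int → Int → PySem.Dict (Int × Int × Int) Int → Int × PySem.Dict (Int × Int × Int) Int
  | [], _, planted, memo => (M - planted, memo)
  | (a, b) :: tail, k, planted, memo =>
    if k = 0 then (M - planted, memo)
    else
      let key : Int × Int × Int := ((tail.length : Int) + 1, k, planted)
      match memo.get? key with
      | some v => (v, memo)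
      | none =>
        let r1 := pvSolveB M tail k planted memo
        let use := min b (M - planted)
        let r2 := pvSolveB M tail (k - 1) (planted + use) r1.2
        let best := if use * a + r2.1 > r1.1 then use * a + r2.1 else r1.1
        (best, r2.2.insert key best)

def max_potatoes_after_year_alt (N : Int) (M : Int) (K : Int) (aList : List Int) (bList : List Int) : Int :=
  -- if M < 0 or K < 0: return 0   (degenerate sizes: no table to fill, nothing to harvest)
  if M < 0 ∨ K < 0 then 0
  else
    let fields := PySem.List.sorted (aList.zip bList) (fun t => -t.1) false
    (pvSolveB M fields K 0 PySem.Dict.empty).1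

-- ===== PRECONDITION & SPEC =====
-- Pre_ excludes only nonsensical negative planting capacities b when M, K ≥ 0: there A either
-- raises IndexError or returns a value produced by Python's negative-index wraparound
-- (or, when only an empty table shields it from the bad index, an accidental 0).
def Pre_max_potatoes_after_year (N : Int) (M : Int) (K : Int) (aList : List Int) (bList : List Int) : Prop :=
  M < 0 ∨ K < 0 ∨ (∀ p ∈ aList.zip bList, 0 ≤ p.2)
instance (N : Int) (M : Int) (K : Int) (aList : List Int) (bList : List Int) : Decidable (Pre_max_potatoes_after_year N M K aList bList) := by unfold Pre_max_potatoes_after_year; infer_instance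

def pvWitness_max_potatoes_after_year : Int × Int × Int × List Int × List Int := (2, 3, 1, [4, 2], [2, 1])

def Spec_max_potatoes_after_year (N : Int) (M : Int) (K : Int) (aList : List Int) (bList : List Int) (out : Int) : Prop := out = max_potatoes_after_year_alt N M K aList bList
instance (N : Int) (M : Int) (K : Int) (aList : List Int) (bList : List Int) (out : Int) : Decidable (Spec_max_potatoes_after_year N M K aList bList out) := by unfold Spec_max_potatoes_after_year; infer_instance

-- ===== CLAIM (what is proved, stated in full; the proofs are below) =====
def Claim_equal_max_potatoes_after_year : Prop := ∀ (N : Int) (M : Int) (K : Int) (aList : List Int) (bList : List Int), Dom_max_potatoes_after_year N M K aList bList → Pre_max_potatoes_after_year N M K aList bList → Spec_max_potatoes_after_year N M K aList bList (max_potatoes_after_year N M K aList bList)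

-- ===== LEMMAS AND PROOFS =====

-- Pure value of B's recursion (the memo stripped away)
def pvG (M : Int) : List (Int × Int) → Int → Int → Int
  | [], _, p => M - p
  | (a, b) :: tail, k, p =>
    if k = 0 then M - p
    else max (pvG M tail k p)
             (min b (M - p) * a + pvG M tail (k - 1) (p + min b (M - p)))



lemma pvG_zero (M : Int) (fs : List (Int × Int)) (p : Int) : pvG M fs 0 p = M - p := by
  cases fs with
  | nil => rfl
  | cons hd tl => obtain ⟨a, b⟩ := hd; simp [pvG]

lemma pvG_ge_base (M : Int) (fs : List (Int × Int)) (k p : Int) : M - p ≤ pvG M fs k p := by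
  induction fs generalizing k p with
  | nil => simp [pvG]
  | cons hd tl ih =>
    obtain ⟨a, b⟩ := hd
    by_cases hk : k = 0
    · simp [pvG, hk]
    · simp only [pvG, if_neg hk]
      exact le_max_of_le_left (ih k p)

lemma pvG_k_mono (M : Int) (fs : List (Int × Int)) (k k' p : Int) (h0 : 0 ≤ k) (h : k ≤ k') :
    pvG M fs k p ≤ pvG M fs k' p := by
  induction fs generalizing k k' p with
  | nil => simp [pvG]
  | cons hd tl ih =>
    obtain ⟨a, b⟩ := hd
    by_cases hk : k = 0
    · subst hk
      rw [pvG_zero]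
      exact pvG_ge_base M _ k' p
    · have hk' : k' ≠ 0 := by omega
      simp only [pvG, if_neg hk, if_neg hk']
      refine max_le_max (ih k k' p h0 h) ?_
      have := ih (k - 1) (k' - 1) (p + min b (M - p)) (by omega) (by omega)
      omega

lemma pvG_skip_le (M : Int) (fs : List (Int × Int)) (a b k p : Int) (h0 : 0 ≤ k) :
    pvG M fs k p ≤ pvG M ((a, b) :: fs) k p := by
  by_cases hk : k = 0
  · subst hk; simp [pvG, pvG_zero]
  · simp only [pvG, if_neg hk]
    exact le_max_left _ _

lemma pvG_p_anti (M : Int) (fs : List (Int × Int)) (k p q : Int)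
    (hb : ∀ r ∈ fs, 0 ≤ r.2) (h0k : 0 ≤ k) (h0 : 0 ≤ q) (hqp : q ≤ p) (hpM : p ≤ M) :
    pvG M fs k p ≤ pvG M fs k q := by
  induction fs generalizing k p q with
  | nil => simp [pvG]; omega
  | cons hd tl ih =>
    obtain ⟨a, b⟩ := hd
    have hbhd : 0 ≤ b := hb (a, b) List.mem_cons_self
    have hbtl : ∀ r ∈ tl, 0 ≤ r.2 := fun r hr => hb r (List.mem_cons_of_mem _ hr)
    by_cases hk : k = 0
    · subst hk; simp [pvG]; omega
    · simp only [pvG, if_neg hk]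
      apply max_le
      · exact le_max_of_le_left (ih k p q hbtl h0k h0 hqp hpM)
      · by_cases ha : 0 ≤ a
        · refine le_max_of_le_right ?_
          have huse : min b (M - p) * a ≤ min b (M - q) * a :=
            mul_le_mul_of_nonneg_right (by omega) ha
          have hrec : pvG M tl (k - 1) (p + min b (M - p)) ≤ pvG M tl (k - 1) (q + min b (M - q)) :=
            ih (k - 1) (p + min b (M - p)) (q + min b (M - q)) hbtl (by omega) (by omega) (by omega) (by omega)
          omega
        · refine le_max_of_le_left ?_
          have h1 : min b (M - p) * a ≤ 0 :=
            mul_nonpos_of_nonneg_of_nonpos (by omega) (by omega)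
          have h2 : pvG M tl (k - 1) (p + min b (M - p)) ≤ pvG M tl (k - 1) q :=
            ih (k - 1) (p + min b (M - p)) q hbtl (by omega) h0 (by omega) (by omega)
          have h3 : pvG M tl (k - 1) q ≤ pvG M tl k q :=
            pvG_k_mono M tl (k - 1) k q (by omega) (by omega)
          omega

-- two suffixes of the same list with equal length coincide
lemma pvSuffix_eq {α : Type} {l1 l2 L : List α} (h1 : l1 <:+ L) (h2 : l2 <:+ L)
    (h : l1.length = l2.length) : l1 = l2 := by
  obtain ⟨t1, rfl⟩ := h1
  obtain ⟨t2, e⟩ := h2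
  have hl : t2.length = t1.length := by
    have := congrArg List.length e
    simp [List.length_append] at this ⊢
    omega
  exact (List.append_inj e.symm hl.symm).2

-- memo invariant: every entry records the pure value of a suffix-state
def pvMemoInv (M : Int) (fields : List (Int × Int)) (memo : PySem.Dict (Int × Int × Int) Int) : Prop :=
  ∀ kv ∈ memo.items, ∃ rest : List (Int × Int), rest <:+ fields ∧
    kv.1.1 = (rest.length : Int) ∧ kv.2 = pvG M rest kv.1.2.1 kv.1.2.2

lemma pvSolveB_correct (M : Int) (fields : List (Int × Int)) :
    ∀ (rest : List (Int × Int)) (k p : Int) (memo : PySem.Dict (Int × Int × Int) Int),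
      rest <:+ fields → pvMemoInv M fields memo →
      (pvSolveB M rest k p memo).1 = pvG M rest k p ∧
        pvMemoInv M fields (pvSolveB M rest k p memo).2 := by
  intro rest
  induction rest with
  | nil => intro k p memo _ hInv; exact ⟨rfl, hInv⟩
  | cons hd tail ih =>
    obtain ⟨a, b⟩ := hd
    intro k p memo hsuf hInv
    by_cases hk : k = 0
    · subst hk; simp [pvSolveB, pvG, hInv]
    · have htail : tail <:+ fields := (List.suffix_cons _ _).trans hsuf
      rcases hget : memo.get? ((tail.length : Int) + 1, k, p) with _ | v
      · -- cache miss
        obtain ⟨ih1, ihInv1⟩ := ih k p memo htail hInv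
        obtain ⟨ih2, ihInv2⟩ := ih (k - 1) (p + min b (M - p))
          (pvSolveB M tail k p memo).2 htail ihInv1
        have hbest : (pvSolveB M ((a, b) :: tail) k p memo).1 = pvG M ((a, b) :: tail) k p := by
          simp only [pvSolveB, hget, if_neg hk]
          rw [ih1, ih2]
          simp only [pvG, if_neg hk]
          omega
        refine ⟨hbest, ?_⟩
        have hstep : (pvSolveB M ((a, b) :: tail) k p memo).2 =
            ((pvSolveB M tail (k - 1) (p + min b (M - p)) (pvSolveB M tail k p memo).2).2).insert
              ((tail.length : Int) + 1, k, p) ((pvSolveB M ((a, b) :: tail) k p memo).1) := by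
          simp only [pvSolveB, hget, if_neg hk]
        rw [hstep, hbest]
        intro kv hkv
        rcases (PySem.Dict.mem_items_insert _ _ _ _).1 hkv with hkv | ⟨hkv, _⟩
        · subst hkv
          exact ⟨(a, b) :: tail, hsuf, by simp, by simp⟩
        · exact ihInv2 kv hkv
      · -- cache hit
        have hres : pvSolveB M ((a, b) :: tail) k p memo = (v, memo) := by
          simp only [pvSolveB, hget, if_neg hk]
        rw [hres]
        refine ⟨?_, hInv⟩
        obtain ⟨rest', hsuf', hlen, hval⟩ :=
          hInv (((tail.length : Int) + 1, k, p), v)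
            (PySem.Dict.mem_items_of_get?_eq_some memo hget)
        have : rest' = (a, b) :: tail := by
          apply pvSuffix_eq hsuf' hsuf
          simp only [List.length_cons] at hlen ⊢
          omega
        subst this
        simpa using hval

lemma pvAlt_eq_pvG (N M K : Int) (aList bList : List Int) (hM : 0 ≤ M) (hK : 0 ≤ K) :
    max_potatoes_after_year_alt N M K aList bList =
      pvG M (PySem.List.sorted (aList.zip bList) (fun t => -t.1) false) K 0 := by
  have h := pvSolveB_correct M (PySem.List.sorted (aList.zip bList) (fun t => -t.1) false)
    (PySem.List.sorted (aList.zip bList) (fun t => -t.1) false) K 0 PySem.Dict.empty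
    List.suffix_rfl (by intro kv hkv; simp [PySem.Dict.empty] at hkv)
  have hguard : ¬ (M < 0 ∨ K < 0) := by omega
  simp only [max_potatoes_after_year_alt, if_neg hguard]
  exact h.1


-- ---------- functional model of A's table ----------

def pvUpd (F : Int → Int → Int) (r c v : Int) : Int → Int → Int :=
  fun y x => if y = r ∧ x = c then max (F y x) v else F y x

def pvInner (M a b y : Int) : (Int → Int → Int) → Int → (Int → Int → Int) :=
  fun G x => pvUpd G (y + 1) (x + min b (M - x)) (G y x + min b (M - x) * a)

def pvOuter (M a b : Int) : (Int → Int → Int) → Int → (Int → Int → Int) :=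
  fun G y => (PySem.List.pyRange (M - 1) (-1) (-1)).foldl (pvInner M a b y) G

def pvPassF (K M a b : Int) (F : Int → Int → Int) : Int → Int → Int :=
  (PySem.List.pyRange (K - 1) (-1) (-1)).foldl (pvOuter M a b) F

def pvPhi (K M : Int) (fs : List (Int × Int)) (F : Int → Int → Int) : Int :=
  (PySem.List.pyRange 0 (K + 1) 1).foldl (fun ans y =>
    (PySem.List.pyRange 0 (M + 1) 1).foldl (fun ans x =>
      max ans (F y x + pvG M fs (K - y) x)) ans) 0

-- pointwise order on tables
def pvLe (F G : Int → Int → Int) : Prop := ∀ y x, F y x ≤ G y x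

-- generic fold facts
lemma pvFoldl_pvLe {ρ : Type} (l : List ρ) (f : (Int → Int → Int) → ρ → (Int → Int → Int))
    (h : ∀ G x, x ∈ l → pvLe G (f G x)) : ∀ G, pvLe G (l.foldl f G) := by
  induction l with
  | nil => intro G; exact fun y x => le_rfl
  | cons hd tl ih =>
    intro G y x
    exact le_trans (h G hd List.mem_cons_self y x)
      (ih (fun G' a ha => h G' a (List.mem_cons_of_mem _ ha)) (f G hd) y x)

lemma pvFoldl_acc_le {ρ : Type} (l : List ρ) (f : Int → ρ → Int)
    (h : ∀ s a, a ∈ l → s ≤ f s a) : ∀ init, init ≤ l.foldl f init := by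
  induction l with
  | nil => intro init; exact le_rfl
  | cons hd tl ih =>
    intro init
    exact le_trans (h init hd List.mem_cons_self)
      (ih (fun s a ha => h s a (List.mem_cons_of_mem _ ha)) (f init hd))

lemma pvFoldl_le_bound {ρ : Type} (l : List ρ) (f : Int → ρ → Int) (B : Int)
    (h : ∀ s a, a ∈ l → s ≤ B → f s a ≤ B) : ∀ init, init ≤ B → l.foldl f init ≤ B := by
  induction l with
  | nil => intro init h0; exact h0
  | cons hd tl ih =>
    intro init h0
    exact ih (fun s a ha => h s a (List.mem_cons_of_mem _ ha)) (f init hd)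
      (h init hd List.mem_cons_self h0)

-- a countdown range splits at any midpoint
lemma pvRange_neg_append (a m b : Int) (h1 : b ≤ m) (h2 : m ≤ a) :
    PySem.List.pyRange a b (-1) = PySem.List.pyRange a m (-1) ++ PySem.List.pyRange m b (-1) := by
  rw [PySem.List.pyRange_neg_one_eq_reverse, PySem.List.pyRange_neg_one_eq_reverse,
    PySem.List.pyRange_neg_one_eq_reverse, ← List.reverse_append,
    ← PySem.List.pyRange_one_append (b + 1) (m + 1) (a + 1) (by omega) (by omega)]

-- the single cells pvInner writes: only row y+1
lemma pvInner_preserve (M a b y : Int) (xl : List Int) (r : Int) (hr : r ≠ y + 1) :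
    ∀ G c, (xl.foldl (pvInner M a b y) G) r c = G r c := by
  induction xl with
  | nil => intro G c; rfl
  | cons hd tl ih =>
    intro G c
    rw [List.foldl_cons, ih]
    simp [pvInner, pvUpd, hr]

lemma pvOuterFold_preserve (M a b : Int) (yl : List Int) (r : Int) (hr : ∀ y ∈ yl, r < y + 1) :
    ∀ G c, (yl.foldl (pvOuter M a b) G) r c = G r c := by
  induction yl with
  | nil => intro G c; rfl
  | cons hd tl ih =>
    intro G c
    rw [List.foldl_cons, ih (fun y hy => hr y (List.mem_cons_of_mem _ hy))]
    exact pvInner_preserve M a b hd _ r (by have := hr hd List.mem_cons_self; omega) G c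

-- pointwise monotonicity of the pass
lemma pvPassF_mono (K M a b : Int) (F : Int → Int → Int) : pvLe F (pvPassF K M a b F) := by
  apply pvFoldl_pvLe
  intro G y _
  apply pvFoldl_pvLe
  intro G' x _ y' x'
  simp only [pvInner, pvUpd]
  split
  · exact le_max_left _ _
  · exact le_rfl


lemma pvInner_step_mono (M a b y : Int) (G : Int → Int → Int) (x : Int) :
    pvLe G (pvInner M a b y G x) := by
  intro y' x'
  simp only [pvInner, pvUpd]
  split
  · exact le_max_left _ _
  · exact le_rfl

lemma pvOuter_step_mono (M a b : Int) (G : Int → Int → Int) (y : Int) :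
    pvLe G (pvOuter M a b G y) :=
  pvFoldl_pvLe _ _ (fun G' x _ => pvInner_step_mono M a b y G' x) G

-- the written cell is at least the written value (lower bound of the pass)
lemma pvPassF_lb (K M a b : Int) (F : Int → Int → Int) (y x : Int)
    (hy0 : 0 ≤ y) (hy : y ≤ K - 1) (hx0 : 0 ≤ x) (hx : x ≤ M - 1) :
    F y x + min b (M - x) * a ≤ pvPassF K M a b F (y + 1) (x + min b (M - x)) := by
  unfold pvPassF
  rw [pvRange_neg_append (K - 1) y (-1) (by omega) (by omega), List.foldl_append,
    PySem.List.pyRange_neg_one_cons (show (-1 : Int) < y by omega), List.foldl_cons]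
  set G1 := (PySem.List.pyRange (K - 1) y (-1)).foldl (pvOuter M a b) F with hG1
  have hG1row : ∀ c, G1 y c = F y c := by
    intro c
    apply pvOuterFold_preserve
    intro y' hy'
    have := (PySem.List.mem_pyRange_neg_one).1 hy'
    omega
  refine le_trans ?_ (pvFoldl_pvLe _ _ (fun G' y' _ => pvOuter_step_mono M a b G' y') _ _ _)
  unfold pvOuter
  rw [pvRange_neg_append (M - 1) x (-1) (by omega) (by omega), List.foldl_append,
    PySem.List.pyRange_neg_one_cons (show (-1 : Int) < x by omega), List.foldl_cons]
  set G2 := (PySem.List.pyRange (M - 1) x (-1)).foldl (pvInner M a b y) G1 with hG2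
  have hG2row : G2 y x = F y x := by
    rw [hG2, pvInner_preserve M a b y _ y (by omega), hG1row]
  refine le_trans ?_ (pvFoldl_pvLe _ _ (fun G' x' _ => pvInner_step_mono M a b y G' x') _ _ _)
  rw [← hG2row]
  simp [pvInner, pvUpd]

-- upper bound : every cell of the pass is bounded by an old cell or by one legitimate source
def pvUB (K M a b : Int) (F G : Int → Int → Int) : Prop :=
  ∀ r c, G r c ≤ F r c ∨ ∃ y x, 0 ≤ y ∧ y ≤ K - 1 ∧ 0 ≤ x ∧ x ≤ M - 1 ∧ r = y + 1 ∧
    c = x + min b (M - x) ∧ G r c ≤ F y x + min b (M - x) * a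

lemma pvUB_inner (K M a b y : Int) (F : Int → Int → Int) (hy0 : 0 ≤ y) (hy : y ≤ K - 1) :
    ∀ (xl : List Int), (∀ x ∈ xl, 0 ≤ x ∧ x ≤ M - 1) → ∀ G, (∀ c, G y c = F y c) →
      pvUB K M a b F G → pvUB K M a b F (xl.foldl (pvInner M a b y) G) := by
  intro xl
  induction xl with
  | nil => intro _ G _ hUB; exact hUB
  | cons x0 tl ih =>
    intro hxl G hrow hUB
    rw [List.foldl_cons]
    have hx0 := hxl x0 List.mem_cons_self
    refine ih (fun x hx => hxl x (List.mem_cons_of_mem _ hx)) _ ?_ ?_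
    · intro c
      simp only [pvInner, pvUpd]
      rw [if_neg (by rintro ⟨h1, -⟩; omega)]
      exact hrow c
    · intro r c
      by_cases hcell : r = y + 1 ∧ c = x0 + min b (M - x0)
      · have hv : (pvInner M a b y G x0) r c = max (G r c) (G y x0 + min b (M - x0) * a) := by
          simp only [pvInner, pvUpd]
          rw [hcell.1, hcell.2]
          simp
        rcases le_total (G r c) (F y x0 + min b (M - x0) * a) with h | h
        · right
          refine ⟨y, x0, hy0, hy, hx0.1, hx0.2, hcell.1, hcell.2, ?_⟩
          rw [hv, hrow]
          exact max_le h le_rfl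
        · have hle : (pvInner M a b y G x0) r c ≤ G r c := by
            rw [hv]
            exact max_le le_rfl (by rw [hrow] at *; omega)
          rcases hUB r c with h' | ⟨y', x', h1, h2, h3, h4, h5, h6, h7⟩
          · exact Or.inl (hle.trans h')
          · exact Or.inr ⟨y', x', h1, h2, h3, h4, h5, h6, hle.trans h7⟩
      · have hv : (pvInner M a b y G x0) r c = G r c := by
          simp only [pvInner, pvUpd]
          rw [if_neg hcell]
        rw [hv]
        exact hUB r c

lemma pvUB_outer (K M a b : Int) (F : Int → Int → Int) :
    ∀ (yl : List Int), (∀ y ∈ yl, 0 ≤ y ∧ y ≤ K - 1) → yl.Pairwise (· > ·) →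
      ∀ G, (∀ y ∈ yl, ∀ c, G y c = F y c) → pvUB K M a b F G →
      pvUB K M a b F (yl.foldl (pvOuter M a b) G) := by
  intro yl
  induction yl with
  | nil => intro _ _ G _ hUB; exact hUB
  | cons y0 tl ih =>
    intro hyl hpw G hrows hUB
    rw [List.foldl_cons]
    have hy0 := hyl y0 List.mem_cons_self
    refine ih (fun y hy => hyl y (List.mem_cons_of_mem _ hy)) hpw.of_cons _ ?_ ?_
    · intro y1 hy1 c
      have hlt : y0 > y1 := List.rel_of_pairwise_cons hpw hy1
      rw [show (pvOuter M a b G y0) y1 c = G y1 c from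
        pvInner_preserve M a b y0 _ y1 (by omega) G c]
      exact hrows y1 (List.mem_cons_of_mem _ hy1) c
    · apply pvUB_inner K M a b y0 F hy0.1 hy0.2
      · intro x hx
        have := (PySem.List.mem_pyRange_neg_one).1 hx
        omega
      · exact hrows y0 List.mem_cons_self
      · exact hUB

lemma pvUB_passF (K M a b : Int) (F : Int → Int → Int) :
    pvUB K M a b F (pvPassF K M a b F) := by
  apply pvUB_outer
  · intro y hy
    have := (PySem.List.mem_pyRange_neg_one).1 hy
    omega
  · rw [PySem.List.pyRange_neg_one_eq_reverse]
    exact List.pairwise_reverse.mpr (by simpa using PySem.List.pairwise_lt_pyRange_one 0 K)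
  · intro y _ c; rfl
  · intro r c; exact Or.inl le_rfl


lemma pvPhi_nonneg (K M : Int) (fs : List (Int × Int)) (F : Int → Int → Int) :
    0 ≤ pvPhi K M fs F :=
  pvFoldl_acc_le _ _ (fun s _ _ => pvFoldl_acc_le _ _ (fun _ _ _ => le_max_left _ _) s) 0

lemma pvPhi_ge (K M : Int) (fs : List (Int × Int)) (F : Int → Int → Int) (y x : Int)
    (hy0 : 0 ≤ y) (hy : y ≤ K) (hx0 : 0 ≤ x) (hx : x ≤ M) :
    F y x + pvG M fs (K - y) x ≤ pvPhi K M fs F := by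
  unfold pvPhi
  rw [PySem.List.pyRange_one_append 0 y (K + 1) (by omega) (by omega), List.foldl_append,
    PySem.List.pyRange_one_cons (show y < K + 1 by omega), List.foldl_cons]
  refine le_trans ?_ (pvFoldl_acc_le _ _
    (fun s y' _ => pvFoldl_acc_le _ _ (fun _ _ _ => le_max_left _ _) s) _)
  exact (PySem.List.le_foldl_max_int _ _ _).2 _ (PySem.List.mem_pyRange_one.2 ⟨by omega, by omega⟩)

lemma pvPhi_le (K M : Int) (fs : List (Int × Int)) (F : Int → Int → Int) (B : Int)
    (hB : 0 ≤ B)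
    (h : ∀ y x, 0 ≤ y → y ≤ K → 0 ≤ x → x ≤ M → F y x + pvG M fs (K - y) x ≤ B) :
    pvPhi K M fs F ≤ B := by
  unfold pvPhi
  refine pvFoldl_le_bound _ _ B ?_ 0 hB
  intro s y hy hsB
  refine pvFoldl_le_bound _ _ B ?_ s hsB
  intro s' x hx hs'B
  have hyb := PySem.List.mem_pyRange_one.1 hy
  have hxb := PySem.List.mem_pyRange_one.1 hx
  exact max_le hs'B (h y x (by omega) (by omega) (by omega) (by omega))

-- one pass of A's table fill corresponds to consing the field onto the recursion
lemma pvPhi_pass (K M a b : Int) (fs : List (Int × Int)) (F : Int → Int → Int)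
    (hM : 0 ≤ M) (hK : 0 ≤ K) (hb : 0 ≤ b) (hfs : ∀ r ∈ fs, 0 ≤ r.2) :
    pvPhi K M fs (pvPassF K M a b F) = pvPhi K M ((a, b) :: fs) F := by
  apply le_antisymm
  · apply pvPhi_le _ _ _ _ _ (pvPhi_nonneg _ _ _ _)
    intro y x hy0 hy hx0 hx
    rcases pvUB_passF K M a b F y x with h | ⟨y', x', h1, h2, h3, h4, rfl, rfl, h7⟩
    · have hskip : pvG M fs (K - y) x ≤ pvG M ((a, b) :: fs) (K - y) x :=
        pvG_skip_le M fs a b (K - y) x (by omega)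
      have hterm := pvPhi_ge K M ((a, b) :: fs) F y x hy0 hy hx0 hx
      linarith
    · have hkne : K - y' ≠ 0 := by omega
      have hincl : min b (M - x') * a + pvG M fs (K - (y' + 1)) (x' + min b (M - x')) ≤
          pvG M ((a, b) :: fs) (K - y') x' := by
        have harg : K - (y' + 1) = K - y' - 1 := by ring
        rw [harg]
        simp only [pvG, if_neg hkne]
        exact le_max_right _ _
      have hterm := pvPhi_ge K M ((a, b) :: fs) F y' x' h1 (by omega) h3 (by omega)
      linarith
  · apply pvPhi_le _ _ _ _ _ (pvPhi_nonneg _ _ _ _)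
    intro y x hy0 hy hx0 hx
    have hmono := pvPassF_mono K M a b F y x
    by_cases hyK : y = K
    · have h00 : K - y = 0 := by omega
      rw [h00, pvG_zero]
      have hterm := pvPhi_ge K M fs (pvPassF K M a b F) y x hy0 hy hx0 hx
      rw [h00, pvG_zero] at hterm
      linarith
    · have hkne : K - y ≠ 0 := by omega
      simp only [pvG, if_neg hkne]
      rw [← max_add_add_left]
      apply max_le
      · have hterm := pvPhi_ge K M fs (pvPassF K M a b F) y x hy0 hy hx0 hx
        linarith
      · by_cases hxM : x = M
        · have h0 : min b (M - x) = 0 := by omega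
          rw [h0]
          simp only [zero_mul, zero_add, add_zero]
          have hmon := pvG_k_mono M fs (K - y - 1) (K - y) x (by omega) (by omega)
          have hterm := pvPhi_ge K M fs (pvPassF K M a b F) y x hy0 hy hx0 hx
          linarith
        · have huse : 0 ≤ min b (M - x) ∧ min b (M - x) ≤ M - x := by omega
          have hlb := pvPassF_lb K M a b F y x hy0 (by omega) hx0 (by omega)
          have hterm := pvPhi_ge K M fs (pvPassF K M a b F) (y + 1) (x + min b (M - x))
            (by omega) (by omega) (by omega) (by omega)
          have harg : K - (y + 1) = K - y - 1 := by ring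
          rw [harg] at hterm
          linarith


lemma pvPhi_foldPass (K M : Int) (hM : 0 ≤ M) (hK : 0 ≤ K) :
    ∀ (fs : List (Int × Int)) (F : Int → Int → Int), (∀ r ∈ fs, 0 ≤ r.2) →
      pvPhi K M [] (fs.foldl (fun F ab => pvPassF K M ab.1 ab.2 F) F) = pvPhi K M fs F := by
  intro fs
  induction fs with
  | nil => intro F _; rfl
  | cons hd tl ih =>
    obtain ⟨a, b⟩ := hd
    intro F hfs
    rw [List.foldl_cons, ih _ (fun r hr => hfs r (List.mem_cons_of_mem _ hr)),
      pvPhi_pass K M a b tl F hM hK (hfs (a, b) List.mem_cons_self)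
        (fun r hr => hfs r (List.mem_cons_of_mem _ hr))]

lemma pvPhi_zero_eq (K M : Int) (fields : List (Int × Int))
    (hM : 0 ≤ M) (hK : 0 ≤ K) (hfs : ∀ r ∈ fields, 0 ≤ r.2) :
    pvPhi K M fields (fun _ _ => 0) = pvG M fields K 0 := by
  have hBnn : 0 ≤ pvG M fields K 0 := by
    have := pvG_ge_base M fields K 0
    linarith
  apply le_antisymm
  · apply pvPhi_le _ _ _ _ _ hBnn
    intro y x hy0 hy hx0 hx
    have h1 := pvG_p_anti M fields (K - y) x 0 hfs (by omega) le_rfl hx0 hx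
    have h2 := pvG_k_mono M fields (K - y) K 0 (by omega) (by omega)
    linarith
  · have := pvPhi_ge K M fields (fun _ _ => 0) 0 0 le_rfl hK le_rfl hM
    simpa using this

-- ---------- the list table simulates the functional table ----------

def pvRel (K M : Int) (dp : List (List Int)) (F : Int → Int → Int) : Prop :=
  dp.length = (K + 1).toNat ∧
  (∀ (i : Nat) (h : i < dp.length), (dp[i]).length = (M + 1).toNat) ∧
  (∀ y x : Int, 0 ≤ y → y ≤ K → 0 ≤ x → x ≤ M → pvReadA dp y x = F y x)

lemma pvReadA_getElem (dp : List (List Int)) (y x : Int) (hy0 : 0 ≤ y)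
    (hy : y.toNat < dp.length) (hx0 : 0 ≤ x) (hx : x.toNat < (dp[y.toNat]).length) :
    pvReadA dp y x = dp[y.toNat][x.toNat] := by
  unfold pvReadA
  rw [PySem.List.pyGet?_of_nonneg _ hy0, List.getElem?_eq_getElem hy, Option.getD_some,
    PySem.List.pyGet?_of_nonneg _ hx0, List.getElem?_eq_getElem hx, Option.getD_some]

lemma pvWriteA_eq (dp : List (List Int)) (r c v : Int) (hr0 : 0 ≤ r)
    (hr : r.toNat < dp.length) (hc0 : 0 ≤ c) :
    pvWriteA dp r c v = dp.set r.toNat ((dp[r.toNat]).set c.toNat v) := by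
  unfold pvWriteA
  rw [PySem.List.pyGet?_of_nonneg _ hr0, List.getElem?_eq_getElem hr, Option.getD_some,
    PySem.List.pySetD_of_nonneg _ _ hc0, PySem.List.pySetD_of_nonneg _ _ hr0]

lemma pvFoldRel {σ τ ρ : Type} (R : σ → τ → Prop) (l : List ρ) (f : σ → ρ → σ) (g : τ → ρ → τ)
    (h : ∀ s t c, c ∈ l → R s t → R (f s c) (g t c)) :
    ∀ s t, R s t → R (l.foldl f s) (l.foldl g t) := by
  induction l with
  | nil => intro s t hst; exact hst
  | cons hd tl ih =>
    intro s t hst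
    exact ih (fun s' t' c hc => h s' t' c (List.mem_cons_of_mem _ hc)) _ _
      (h s t hd List.mem_cons_self hst)

lemma pvRel_step (K M a b y x : Int) (hM : 0 ≤ M) (hK : 0 ≤ K) (hb : 0 ≤ b)
    (hy0 : 0 ≤ y) (hy : y ≤ K - 1) (hx0 : 0 ≤ x) (hx : x ≤ M - 1)
    (dp : List (List Int)) (F : Int → Int → Int) (hrel : pvRel K M dp F) :
    pvRel K M
      (pvWriteA dp (y + 1) (x + min b (M - x))
        (max (pvReadA dp (y + 1) (x + min b (M - x)))
             (pvReadA dp y x + min b (M - x) * a)))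
      (pvInner M a b y F x) := by
  obtain ⟨hlen, hrows, hread⟩ := hrel
  have huse : 0 ≤ min b (M - x) ∧ min b (M - x) ≤ M - x := by omega
  have hr : (y + 1).toNat < dp.length := by omega
  have hc : (x + min b (M - x)).toNat < (dp[(y + 1).toNat]).length := by
    rw [hrows _ hr]; omega
  rw [pvWriteA_eq dp _ _ _ (by omega) hr (by omega)]
  set newv := max (pvReadA dp (y + 1) (x + min b (M - x))) (pvReadA dp y x + min b (M - x) * a)
    with hnewv
  set dpn := dp.set (y + 1).toNat ((dp[(y + 1).toNat]).set (x + min b (M - x)).toNat newv)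
    with hdpn
  have hlen' : dpn.length = (K + 1).toNat := by simp [hdpn, hlen]
  have hrows' : ∀ (i : Nat) (h : i < dpn.length), (dpn[i]).length = (M + 1).toNat := by
    intro i h
    have hi' : i < dp.length := by simp [hdpn] at h; exact h
    simp only [hdpn, List.getElem_set]
    split
    · simpa using hrows _ hr
    · exact hrows i hi'
  refine ⟨hlen', hrows', ?_⟩
  intro y' x' hy'0 hy' hx'0 hx'
  have hy'lt : y'.toNat < dp.length := by omega
  have hx'lt : x'.toNat < (dp[y'.toNat]).length := by rw [hrows _ hy'lt]; omega
  have hbase : pvReadA dp y' x' = F y' x' := hread y' x' hy'0 hy' hx'0 hx'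
  rw [pvReadA_getElem dp y' x' hy'0 hy'lt hx'0 hx'lt] at hbase
  have hvals : newv = max (F (y + 1) (x + min b (M - x))) (F y x + min b (M - x) * a) := by
    rw [hnewv, hread (y + 1) _ (by omega) (by omega) (by omega) (by omega),
      hread y x (by omega) (by omega) (by omega) (by omega)]
  rw [pvReadA_getElem dpn y' x' hy'0 (by omega) hx'0
    (by rw [hrows' y'.toNat (by omega)]; omega)]
  simp only [pvInner, pvUpd]
  by_cases he1 : y' = y + 1
  · subst he1
    by_cases he2 : x' = x + min b (M - x)
    · subst he2
      rw [if_pos (And.intro rfl rfl)]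
      simp [hdpn, hvals]
    · rw [if_neg (by rintro ⟨-, h2⟩; exact he2 h2)]
      have hne : (x + min b (M - x)).toNat ≠ x'.toNat := by omega
      simp [hdpn, hne]
      exact hbase
  · rw [if_neg (by rintro ⟨h1, -⟩; exact he1 h1)]
    have hne1 : (y + 1).toNat ≠ y'.toNat := by omega
    simp only [hdpn, List.getElem_set, if_neg hne1]
    exact hbase

lemma pvRel_init (K M : Int) (hM : 0 ≤ M) (hK : 0 ≤ K) :
    pvRel K M (List.replicate (K + 1).toNat (List.replicate (M + 1).toNat 0))
      (fun _ _ => 0) := by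
  refine ⟨by simp, ?_, ?_⟩
  · intro i h
    simp
  · intro y x hy0 hy hx0 hx
    rw [pvReadA_getElem _ _ _ hy0 (by simp; omega) hx0 (by simp; omega)]
    simp

-- A's table scan is empty for negative M or K, so A returns the initial 0
lemma pvA_degenerate (N M K : Int) (aList bList : List Int) (h : M < 0 ∨ K < 0) :
    max_potatoes_after_year N M K aList bList = 0 := by
  unfold max_potatoes_after_year
  simp only []
  rcases h with h | h
  · have hnil : PySem.List.pyRange 0 (M + 1) 1 = [] := PySem.List.pyRange_one_eq_nil (by omega)
    rw [hnil]
    simp [List.foldl_nil]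
  · have hnil : PySem.List.pyRange 0 (K + 1) 1 = [] := PySem.List.pyRange_one_eq_nil (by omega)
    rw [hnil]
    simp [List.foldl_nil]

-- ===== VERDICT (by name: the statement is the Claim_ definition above) =====
theorem max_potatoes_after_year_spec : Claim_equal_max_potatoes_after_year := by
  intro N M K aL bL hDom hPre
  unfold Spec_max_potatoes_after_year
  by_cases hdeg : M < 0 ∨ K < 0
  · rw [pvA_degenerate N M K aL bL hdeg]
    unfold max_potatoes_after_year_alt
    rw [if_pos hdeg]
  have hM : 0 ≤ M := by omega
  have hK : 0 ≤ K := by omega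
  have hzip : ∀ p ∈ aL.zip bL, 0 ≤ p.2 := by
    rcases hPre with h | h | h
    · omega
    · omega
    · exact h
  rw [pvAlt_eq_pvG N M K aL bL hM hK]
  unfold max_potatoes_after_year
  simp only []
  set fields := PySem.List.sorted (aL.zip bL) (fun t => -t.1) false with hfields
  have hfs : ∀ r ∈ fields, 0 ≤ r.2 := by
    intro r hr
    exact hzip r ((PySem.List.mem_sorted _ _ _ _).1 hr)
  have hrel0 := pvRel_init K M hM hK
  have hstep : ∀ dp F ab, ab ∈ fields → pvRel K M dp F →
      pvRel K M ((PySem.List.pyRange (K - 1) (-1) (-1)).foldl (fun dp y =>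
        (PySem.List.pyRange (M - 1) (-1) (-1)).foldl (fun dp x =>
          let use := min ab.2 (M - x)
          pvWriteA dp (y + 1) (x + use)
            (max (pvReadA dp (y + 1) (x + use)) (pvReadA dp y x + use * ab.1))) dp) dp)
        (pvPassF K M ab.1 ab.2 F) := by
    intro dp F ab hab hrel
    have hb : 0 ≤ ab.2 := hfs ab hab
    unfold pvPassF
    refine pvFoldRel (pvRel K M) _ _ _ ?_ dp F hrel
    intro dp' F' y hymem hrel'
    have hyb := PySem.List.mem_pyRange_neg_one.1 hymem
    unfold pvOuter
    refine pvFoldRel (pvRel K M) _ _ _ ?_ dp' F' hrel'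
    intro dp'' F'' x hxmem hrel''
    have hxb := PySem.List.mem_pyRange_neg_one.1 hxmem
    exact pvRel_step K M ab.1 ab.2 y x hM hK hb (by omega) (by omega) (by omega) (by omega)
      dp'' F'' hrel''
  have hrelN := pvFoldRel (pvRel K M) fields _ _ hstep
    (List.replicate (K + 1).toNat (List.replicate (M + 1).toNat 0)) (fun _ _ => 0) hrel0
  have hscan : (PySem.List.pyRange 0 (K + 1) 1).foldl (fun ans y =>
      (PySem.List.pyRange 0 (M + 1) 1).foldl (fun ans x =>
        max ans (pvReadA (fields.foldl (fun dp ab =>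
          (PySem.List.pyRange (K - 1) (-1) (-1)).foldl (fun dp y =>
            (PySem.List.pyRange (M - 1) (-1) (-1)).foldl (fun dp x =>
              let use := min ab.2 (M - x)
              pvWriteA dp (y + 1) (x + use)
                (max (pvReadA dp (y + 1) (x + use)) (pvReadA dp y x + use * ab.1))) dp) dp)
          (List.replicate (K + 1).toNat (List.replicate (M + 1).toNat 0))) y x + M - x)) ans) 0
      = pvPhi K M []
        (fields.foldl (fun F ab => pvPassF K M ab.1 ab.2 F) (fun _ _ => 0)) := by
    unfold pvPhi
    apply PySem.List.foldl_congr_mem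
    intro acc y hymem
    apply PySem.List.foldl_congr_mem
    intro acc' x hxmem
    have hyb := PySem.List.mem_pyRange_one.1 hymem
    have hxb := PySem.List.mem_pyRange_one.1 hxmem
    rw [hrelN.2.2 y x (by omega) (by omega) (by omega) (by omega)]
    have hnil : pvG M [] (K - y) x = M - x := rfl
    rw [hnil]
    exact congrArg (max acc') (by ring)
  rw [hscan, pvPhi_foldPass K M hM hK fields _ hfs, pvPhi_zero_eq K M fields hM hK hfs]
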